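-- pv_equiv track=rewrite | github.com/wolfgangihloff/tahecho | agents/langgraph_workflow.py | _create_user_friendly_error_message
-- ===== SOURCE A (Python) =====
-- def _create_user_friendly_error_message(agent_errors: list, user_input: str) -> str:
--     """Create a user-friendly error message based on the type of error."""
--     if not agent_errors:
--         return "I'm sorry, but I encountered an unexpected issue. Please try again."
--
--     # Analyze the errors to determine what went wrong
--     error_types = []
--     for agent, error in agent_errors:
--         error_str = str(error).lower()
--
--         # Check for specific error types
--         if "api key" in error_str or "invalid api key" in error_str:
--             error_types.append("openai_api")
--         elif "401" in error_str or "unauthorized" in error_str: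
--             if "jira" in error_str or agent == "mcp_agent":
--                 error_types.append("jira_auth")
--             else:
--                 error_types.append("api_auth")
--         elif "connection" in error_str or "timeout" in error_str:
--             error_types.append("connection")
--         elif "neo4j" in error_str or "graph" in error_str:
--             error_types.append("graph_db")
--         else:
--             error_types.append("general")
--
--     # Create appropriate user message
--     if "openai_api" in error_types:
--         return "I'm having trouble connecting to my language processing service. This might be a temporary issue. Please try again in a moment."
--     elif "jira_auth" in error_types:
--         return "I'm unable to access your Jira information right now. Please check your Jira credentials and try again."
--     elif "graph_db" in error_types:
--         return "I'm having trouble accessing the relationship database. You can still ask basic questions about your tasks."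
--     elif "connection" in error_types:
--         return "I'm experiencing connection issues with one of my services. Please try again in a moment."
--     elif "api_auth" in error_types:
--         return "I'm having trouble authenticating with one of my services. Please check your configuration and try again."
--     else:
--         return "I encountered an issue while processing your request. Please try rephrasing your question or try again later."
-- ===== SOURCE B (Python) =====
-- MESSAGES = [
--     "I'm having trouble connecting to my language processing service. This might be a temporary issue. Please try again in a moment.",
--     "I'm unable to access your Jira information right now. Please check your Jira credentials and try again.",
--     "I'm having trouble accessing the relationship database. You can still ask basic questions about your tasks.",
--     "I'm experiencing connection issues with one of my services. Please try again in a moment.",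
--     "I'm having trouble authenticating with one of my services. Please check your configuration and try again.",
--     "I encountered an issue while processing your request. Please try rephrasing your question or try again later.",
-- ]
--
--
-- def _rank(agent, error):
--     e = str(error).lower()
--     if "api key" in e:
--         return 0
--     if "401" in e or "unauthorized" in e:
--         return 1 if ("jira" in e or agent == "mcp_agent") else 4
--     if "connection" in e or "timeout" in e:
--         return 3
--     if "neo4j" in e or "graph" in e:
--         return 2
--     return 5
--
--
-- def _create_user_friendly_error_message(agent_errors: list, user_input: str) -> str:
--     if not agent_errors:
--         return "I'm sorry, but I encountered an unexpected issue. Please try again."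
--     best = 5
--     for agent, error in agent_errors:
--         best = min(best, _rank(agent, error))
--     return MESSAGES[best]
-- ===== Notes on version B (the rewrite author's own statement) =====
-- stated objective: simpler
-- what changed: B drops A's intermediate error_types list and the six-way membership chain: one pass maps each (agent, error) pair to a numeric priority rank and keeps the running minimum, then indexes a fixed message table by the best rank.
import Mathlib
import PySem

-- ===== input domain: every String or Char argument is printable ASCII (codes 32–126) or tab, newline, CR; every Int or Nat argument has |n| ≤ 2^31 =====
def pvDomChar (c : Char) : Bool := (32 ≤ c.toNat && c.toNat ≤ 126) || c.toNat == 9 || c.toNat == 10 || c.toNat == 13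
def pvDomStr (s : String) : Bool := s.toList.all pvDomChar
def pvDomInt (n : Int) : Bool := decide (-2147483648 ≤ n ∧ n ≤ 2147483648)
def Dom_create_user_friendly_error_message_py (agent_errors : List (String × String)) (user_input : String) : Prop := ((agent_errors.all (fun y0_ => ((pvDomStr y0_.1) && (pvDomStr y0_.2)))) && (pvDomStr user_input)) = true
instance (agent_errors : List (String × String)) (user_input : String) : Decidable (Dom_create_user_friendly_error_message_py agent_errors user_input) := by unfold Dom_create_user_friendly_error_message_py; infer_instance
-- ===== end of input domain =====

-- B replaces A's intermediate error_types list and membership chain by a single pass keeping a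
-- running minimum priority rank, then indexes a fixed message table (objective: simpler).

-- ===== PORT A =====
-- A's per-pair classification (the body of A's first loop iteration)
-- error_str := str(error).lower() is inlined as PySem.Str.lower error throughout
def pvClassify (agent : String) (error : String) : String :=
  if PySem.Str.isIn "api key" (PySem.Str.lower error) || PySem.Str.isIn "invalid api key" (PySem.Str.lower error) then
    "openai_api"
  else if PySem.Str.isIn "401" (PySem.Str.lower error) || PySem.Str.isIn "unauthorized" (PySem.Str.lower error) then
    if PySem.Str.isIn "jira" (PySem.Str.lower error) || agent == "mcp_agent" then "jira_auth" else "api_auth"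
  else if PySem.Str.isIn "connection" (PySem.Str.lower error) || PySem.Str.isIn "timeout" (PySem.Str.lower error) then
    "connection"
  else if PySem.Str.isIn "neo4j" (PySem.Str.lower error) || PySem.Str.isIn "graph" (PySem.Str.lower error) then
    "graph_db"
  else
    "general"

def create_user_friendly_error_message_py (agent_errors : List (String × String)) (user_input : String) : String :=
  if agent_errors.isEmpty then
    "I'm sorry, but I encountered an unexpected issue. Please try again."
  else
    let error_types := agent_errors.foldl (fun acc p => acc ++ [pvClassify p.1 p.2]) []
    if error_types.contains "openai_api" then
      "I'm having trouble connecting to my language processing service. This might be a temporary issue. Please try again in a moment."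
    else if error_types.contains "jira_auth" then
      "I'm unable to access your Jira information right now. Please check your Jira credentials and try again."
    else if error_types.contains "graph_db" then
      "I'm having trouble accessing the relationship database. You can still ask basic questions about your tasks."
    else if error_types.contains "connection" then
      "I'm experiencing connection issues with one of my services. Please try again in a moment."
    else if error_types.contains "api_auth" then
      "I'm having trouble authenticating with one of my services. Please check your configuration and try again."
    else
      "I encountered an issue while processing your request. Please try rephrasing your question or try again later."

-- ===== PORT B =====
def pvMessages : List String :=
  [ "I'm having trouble connecting to my language processing service. This might be a temporary issue. Please try again in a moment."
  , "I'm unable to access your Jira information right now. Please check your Jira credentials and try again."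
  , "I'm having trouble accessing the relationship database. You can still ask basic questions about your tasks."
  , "I'm experiencing connection issues with one of my services. Please try again in a moment."
  , "I'm having trouble authenticating with one of my services. Please check your configuration and try again."
  , "I encountered an issue while processing your request. Please try rephrasing your question or try again later." ]

-- e := str(error).lower() is inlined as PySem.Str.lower error throughout
def pvRank (agent : String) (error : String) : Nat :=
  if PySem.Str.isIn "api key" (PySem.Str.lower error) then 0
  else if PySem.Str.isIn "401" (PySem.Str.lower error) || PySem.Str.isIn "unauthorized" (PySem.Str.lower error) then
    if PySem.Str.isIn "jira" (PySem.Str.lower error) || agent == "mcp_agent" then 1 else 4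
  else if PySem.Str.isIn "connection" (PySem.Str.lower error) || PySem.Str.isIn "timeout" (PySem.Str.lower error) then 3
  else if PySem.Str.isIn "neo4j" (PySem.Str.lower error) || PySem.Str.isIn "graph" (PySem.Str.lower error) then 2
  else 5

def create_user_friendly_error_message_py_alt (agent_errors : List (String × String)) (user_input : String) : String :=
  if agent_errors.isEmpty then
    "I'm sorry, but I encountered an unexpected issue. Please try again."
  else
    pvMessages.getD (agent_errors.foldl (fun best p => min best (pvRank p.1 p.2)) 5) ""

-- ===== PRECONDITION & SPEC =====
def Spec_create_user_friendly_error_message_py (agent_errors : List (String × String)) (user_input : String) (out : String) : Prop := out = create_user_friendly_error_message_py_alt agent_errors user_input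
instance (agent_errors : List (String × String)) (user_input : String) (out : String) : Decidable (Spec_create_user_friendly_error_message_py agent_errors user_input out) := by unfold Spec_create_user_friendly_error_message_py; infer_instance

-- ===== CLAIM (what is proved, stated in full; the proofs are below) =====
def Claim_equal_create_user_friendly_error_message_py : Prop := ∀ (agent_errors : List (String × String)) (user_input : String), Dom_create_user_friendly_error_message_py agent_errors user_input → Spec_create_user_friendly_error_message_py agent_errors user_input (create_user_friendly_error_message_py agent_errors user_input)

-- ===== LEMMAS AND PROOFS =====

-- rank assigned by B to each of A's six label strings
def pvLabelRank (l : String) : Nat :=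
  if l = "openai_api" then 0
  else if l = "jira_auth" then 1
  else if l = "graph_db" then 2
  else if l = "connection" then 3
  else if l = "api_auth" then 4
  else 5

lemma pv_apikey_infix (s : String) (h : PySem.Str.isIn "invalid api key" s = true) :
    PySem.Str.isIn "api key" s = true := by
  simp only [PySem.Str.isIn_eq] at *
  rw [PySem.Chars.isIn_iff_infix] at h ⊢
  exact List.IsInfix.trans (by decide) h

lemma pv_rank_classify (a e : String) : pvRank a e = pvLabelRank (pvClassify a e) := by
  have himp := pv_apikey_infix (PySem.Str.lower e)
  unfold pvRank pvClassify
  generalize (a == "mcp_agent") = b0 at *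
  generalize h1 : PySem.Str.isIn "api key" (PySem.Str.lower e) = b1 at *
  generalize h2 : PySem.Str.isIn "invalid api key" (PySem.Str.lower e) = b2 at *
  generalize h3 : PySem.Str.isIn "401" (PySem.Str.lower e) = b3 at *
  generalize h4 : PySem.Str.isIn "unauthorized" (PySem.Str.lower e) = b4 at *
  generalize h5 : PySem.Str.isIn "jira" (PySem.Str.lower e) = b5 at *
  generalize h6 : PySem.Str.isIn "connection" (PySem.Str.lower e) = b6 at *
  generalize h7 : PySem.Str.isIn "timeout" (PySem.Str.lower e) = b7 at *
  generalize h8 : PySem.Str.isIn "neo4j" (PySem.Str.lower e) = b8 at *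
  generalize h9 : PySem.Str.isIn "graph" (PySem.Str.lower e) = b9 at *
  clear h1 h2 h3 h4 h5 h6 h7 h8 h9
  revert himp
  revert b0 b1 b2 b3 b4 b5 b6 b7 b8 b9
  decide

lemma pv_classify_cases (a e : String) :
    pvClassify a e = "openai_api" ∨ pvClassify a e = "jira_auth" ∨ pvClassify a e = "api_auth" ∨
    pvClassify a e = "connection" ∨ pvClassify a e = "graph_db" ∨ pvClassify a e = "general" := by
  unfold pvClassify; split_ifs <;> simp

lemma pv_foldl_min_init (L : List Nat) (a : Nat) : L.foldl min a ≤ a := by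
  induction L generalizing a with
  | nil => exact le_rfl
  | cons y ys ih => exact le_trans (ih _) (min_le_left _ _)

lemma pv_foldl_min_le {L : List Nat} {a x : Nat} (hx : x ∈ L) : L.foldl min a ≤ x := by
  induction L generalizing a with
  | nil => cases hx
  | cons y ys ih =>
    rcases List.mem_cons.mp hx with rfl | hx'
    · exact le_trans (pv_foldl_min_init ys (min a x)) (min_le_right a x)
    · exact ih hx'

lemma pv_foldl_min_mem (L : List Nat) (a : Nat) : L.foldl min a = a ∨ L.foldl min a ∈ L := by
  induction L generalizing a with
  | nil => exact Or.inl rfl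
  | cons y ys ih =>
    rcases ih (min a y) with h | h
    · rcases le_total a y with hay | hya
      · exact Or.inl (by simpa [Nat.min_eq_left hay] using h)
      · exact Or.inr (by simp [List.foldl]; left; simpa [Nat.min_eq_right hya] using h)
    · exact Or.inr (List.mem_cons_of_mem _ h)

-- main selection lemma, on the label list
lemma pv_select (labels : List String)
    (hc : ∀ l ∈ labels, l = "openai_api" ∨ l = "jira_auth" ∨ l = "api_auth" ∨
          l = "connection" ∨ l = "graph_db" ∨ l = "general") :
    (if labels.contains "openai_api" then
      "I'm having trouble connecting to my language processing service. This might be a temporary issue. Please try again in a moment."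
    else if labels.contains "jira_auth" then
      "I'm unable to access your Jira information right now. Please check your Jira credentials and try again."
    else if labels.contains "graph_db" then
      "I'm having trouble accessing the relationship database. You can still ask basic questions about your tasks."
    else if labels.contains "connection" then
      "I'm experiencing connection issues with one of my services. Please try again in a moment."
    else if labels.contains "api_auth" then
      "I'm having trouble authenticating with one of my services. Please check your configuration and try again."
    else
      "I encountered an issue while processing your request. Please try rephrasing your question or try again later.")
    = pvMessages.getD ((labels.map pvLabelRank).foldl min 5) "" := by
  set m := (labels.map pvLabelRank).foldl min 5 with hm
  have hmem : ∀ k, m = k → k ≠ 5 → ∃ l ∈ labels, pvLabelRank l = k := by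
    intro k hk hk5
    rcases pv_foldl_min_mem (labels.map pvLabelRank) 5 with h | h
    · rw [← hm, hk] at h; exact absurd h hk5
    · rw [← hm, hk] at h
      rcases List.mem_map.mp h with ⟨l, hl, he⟩
      exact ⟨l, hl, he⟩
  have hle : ∀ l ∈ labels, m ≤ pvLabelRank l := fun l hl =>
    pv_foldl_min_le (List.mem_map_of_mem hl)
  by_cases h0 : "openai_api" ∈ labels
  · have : m = 0 := Nat.le_zero.mp (by simpa [pvLabelRank] using hle _ h0)
    simp [h0, this, pvMessages]
  · have n0 : m ≠ 0 := by
      intro h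
      rcases hmem 0 h (by decide) with ⟨l, hl, he⟩
      rcases hc l hl with h' | h' | h' | h' | h' | h' <;> subst h' <;> simp [pvLabelRank] at he h0 hl <;> exact h0 hl
    by_cases h1 : "jira_auth" ∈ labels
    · have : m = 1 := by
        have := hle _ h1; simp [pvLabelRank] at this; omega
      simp [h0, h1, this, pvMessages]
    · have n1 : m ≠ 1 := by
        intro h
        rcases hmem 1 h (by decide) with ⟨l, hl, he⟩
        rcases hc l hl with h' | h' | h' | h' | h' | h' <;> subst h' <;> simp [pvLabelRank] at he <;> exact h1 hl
      by_cases h2 : "graph_db" ∈ labels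
      · have : m = 2 := by
          have := hle _ h2; simp [pvLabelRank] at this; omega
        simp [h0, h1, h2, this, pvMessages]
      · have n2 : m ≠ 2 := by
          intro h
          rcases hmem 2 h (by decide) with ⟨l, hl, he⟩
          rcases hc l hl with h' | h' | h' | h' | h' | h' <;> subst h' <;> simp [pvLabelRank] at he <;> exact h2 hl
        by_cases h3 : "connection" ∈ labels
        · have : m = 3 := by
            have := hle _ h3; simp [pvLabelRank] at this; omega
          simp [h0, h1, h2, h3, this, pvMessages]
        · have n3 : m ≠ 3 := by
            intro h
            rcases hmem 3 h (by decide) with ⟨l, hl, he⟩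
            rcases hc l hl with h' | h' | h' | h' | h' | h' <;> subst h' <;> simp [pvLabelRank] at he <;> exact h3 hl
          by_cases h4 : "api_auth" ∈ labels
          · have : m = 4 := by
              have := hle _ h4; simp [pvLabelRank] at this; omega
            simp [h0, h1, h2, h3, h4, this, pvMessages]
          · have n4 : m ≠ 4 := by
              intro h
              rcases hmem 4 h (by decide) with ⟨l, hl, he⟩
              rcases hc l hl with h' | h' | h' | h' | h' | h' <;> subst h' <;> simp [pvLabelRank] at he <;> exact h4 hl
            have : m = 5 := by
              have := pv_foldl_min_init (labels.map pvLabelRank) 5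
              omega
            simp [h0, h1, h2, h3, h4, this, pvMessages]

-- ===== VERDICT (by name: the statement is the Claim_ definition above) =====
theorem create_user_friendly_error_message_py_spec : Claim_equal_create_user_friendly_error_message_py := by
  intro agent_errors user_input _
  unfold Spec_create_user_friendly_error_message_py
  unfold create_user_friendly_error_message_py create_user_friendly_error_message_py_alt
  by_cases he : agent_errors.isEmpty
  · simp [he]
  · simp only [he, if_false, Bool.false_eq_true]
    have hfold : agent_errors.foldl (fun acc p => acc ++ [pvClassify p.1 p.2]) [] =
        agent_errors.map (fun p => pvClassify p.1 p.2) := by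
      simpa using PySem.List.foldl_append_singleton_eq_map
        (l := agent_errors) (f := fun p : String × String => pvClassify p.1 p.2) (acc := [])
    have hrank : agent_errors.foldl (fun best p => min best (pvRank p.1 p.2)) 5 =
        ((agent_errors.map (fun p => pvClassify p.1 p.2)).map pvLabelRank).foldl min 5 := by
      rw [List.map_map, List.foldl_map]
      simp [Function.comp, pv_rank_classify]
    rw [hfold, hrank]
    exact pv_select _ (fun l hl => by
      rcases List.mem_map.mp hl with ⟨p, _, rfl⟩
      exact pv_classify_cases p.1 p.2)
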